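-- pv_equiv track=rewrite | github.com/atharvak-3000/DAA | A1/a3.py | find_min_num
-- ===== SOURCE A (Python) =====
-- def find_min_num(z):
--     num = 1
--     count = 0
--
--     while True:
--         temp = num
--         while temp % 5 == 0:
--             count += 1
--             temp //= 5
--         if count >= z:
--             return num
--         num += 1
-- ===== SOURCE B (Python) =====
-- def find_min_num(z):
--     if z <= 0:
--         return 1
--     def zeros(n):
--         # number of trailing zeros of n! (Legendre's formula)
--         c = 0
--         p = 5
--         while p <= n:
--             c += n // p
--             p *= 5
--         return c
--     lo, hi = 1, 5 * z
--     while lo < hi: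
--         mid = (lo + hi) // 2
--         if zeros(mid) >= z:
--             hi = mid
--         else:
--             lo = mid + 1
--     return lo
-- ===== Notes on version B (the rewrite author's own statement) =====
-- stated objective: faster
-- what changed: replaced A's linear scan (which increments num one by one while accumulating factors of 5) by a binary search over n using Legendre's formula for the number of trailing zeros of n!
import Mathlib
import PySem

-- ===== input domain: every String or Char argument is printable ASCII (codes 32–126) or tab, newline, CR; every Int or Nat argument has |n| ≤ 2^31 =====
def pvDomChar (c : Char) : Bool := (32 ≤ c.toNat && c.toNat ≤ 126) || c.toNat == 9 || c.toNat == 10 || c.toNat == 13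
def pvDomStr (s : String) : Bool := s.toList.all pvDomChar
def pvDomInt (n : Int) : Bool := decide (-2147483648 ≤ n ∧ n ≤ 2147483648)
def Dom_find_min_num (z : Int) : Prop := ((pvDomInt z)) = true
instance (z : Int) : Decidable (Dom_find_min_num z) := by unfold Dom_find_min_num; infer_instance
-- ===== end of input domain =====

-- B replaces A's linear scan over num (accumulating factors of 5) by a binary search
-- over n using Legendre's formula for the trailing zeros of n!  (objective: faster).

-- ===== PORT A =====
-- termination facts for the ports, stated as named lemmas (the ports cite them in decreasing_by)
theorem pv_dec_countf (temp : Int) (h1 : PySem.Int.mod temp 5 = 0) (h2 : temp ≠ 0) :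
    (PySem.Int.floordiv temp 5).natAbs < temp.natAbs := by
  rw [PySem.Int.mod_eq_emod_of_pos (by decide)] at h1
  rw [PySem.Int.floordiv_eq_ediv_of_pos (by decide)]
  omega

-- inner loop `while temp % 5 == 0: count += 1; temp //= 5`.
-- The extra guard `temp ≠ 0` is a totality guard only: it is unreachable from A's
-- entry (temp = num ≥ 1 always), where Python would loop forever on temp = 0.
def countf (temp count : Int) : Int :=
  if h : PySem.Int.mod temp 5 = 0 ∧ temp ≠ 0 then
    countf (PySem.Int.floordiv temp 5) (count + 1)
  else count
termination_by temp.natAbs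
decreasing_by exact pv_dec_countf temp h.1 h.2

-- the next three lemmas are needed (by name) in loopA's decreasing_by, hence stated before it
theorem countf_le (temp count : Int) : count ≤ countf temp count := by
  unfold countf
  split
  · exact le_trans (by omega) (countf_le (PySem.Int.floordiv temp 5) (count + 1))
  · exact le_refl _
termination_by temp.natAbs
decreasing_by
  rename_i h
  exact pv_dec_countf temp h.1 h.2

theorem countf_of_not_dvd (temp count : Int) (h : PySem.Int.mod temp 5 ≠ 0) :
    countf temp count = count := by
  rw [countf, dif_neg (fun hc => h hc.1)]

theorem countf_succ_le (temp count : Int) (h1 : PySem.Int.mod temp 5 = 0) (h2 : temp ≠ 0) :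
    count + 1 ≤ countf temp count := by
  rw [countf, dif_pos ⟨h1, h2⟩]
  exact countf_le _ _

theorem pv_meas_lt_of_lt (A B g g' : Nat) (h1 : A < B) (h2 : g' ≤ 4) :
    5 * A + g' < 5 * B + g := by omega

theorem pv_meas_lt_of_eq (A g g' : Nat) (h : g' < g) : 5 * A + g' < 5 * A + g :=
  Nat.add_lt_add_left h _

theorem pv_toNat_lt (z a b : Int) (h1 : a + 1 ≤ b) (h2 : ¬ b ≥ z) :
    (z - b).toNat < (z - a).toNat := by omega

theorem pv_toNat_le4 (r : Int) (h0 : 0 ≤ r) : (4 - r).toNat ≤ 4 := by omega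

theorem pv_gap_lt (r : Int) (h1 : 1 ≤ r) (h4 : r ≤ 4) :
    (4 - r).toNat < (4 - (r - 1)).toNat := by omega

theorem pv_mod_pred (num : Int) (hd : num % 5 ≠ 0) : (num - 1) % 5 = num % 5 - 1 := by
  omega

theorem pv_mod_lb (num : Int) : 0 ≤ num % 5 := Int.emod_nonneg num (by decide)

theorem pv_mod_ub (num : Int) : num % 5 < 5 := Int.emod_lt_of_pos num (by decide)

theorem pv_dec_loopA (z num count : Int) (h : 1 ≤ num) (hn : ¬ countf num count ≥ z) :
    5 * (z - countf num count).toNat + (4 - (num + 1 - 1) % 5).toNat <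
      5 * (z - count).toNat + (4 - (num - 1) % 5).toNat := by
  have e0 : num + 1 - 1 = num := Int.add_sub_cancel num 1
  rw [e0]
  by_cases hd : num % 5 = 0
  · have h1 : count + 1 ≤ countf num count := by
      apply countf_succ_le
      · rw [PySem.Int.mod_eq_emod_of_pos (by decide)]; exact hd
      · exact fun hz => absurd (hz ▸ h) (by decide)
    exact pv_meas_lt_of_lt _ _ _ _ (pv_toNat_lt z count _ h1 hn) (pv_toNat_le4 _ (pv_mod_lb num))
  · have h2 : countf num count = count := by
      apply countf_of_not_dvd
      rw [PySem.Int.mod_eq_emod_of_pos (by decide)]; exact hd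
    rw [h2]
    have hgg : (4 - num % 5).toNat < (4 - (num - 1) % 5).toNat := by
      rw [pv_mod_pred num hd]
      exact pv_gap_lt _ (lt_of_le_of_ne (pv_mod_lb num) (Ne.symm hd)) (by
        exact Int.lt_add_one_iff.mp (pv_mod_ub num))
    exact pv_meas_lt_of_eq _ _ _ hgg

theorem pv_one_le_succ (num : Int) (h : 1 ≤ num) : 1 ≤ num + 1 := le_trans h (by omega)

-- outer loop `while True: …`; carries the invariant 1 ≤ num (true at entry, preserved),
-- which the termination argument needs.
def loopA (z num count : Int) (h : 1 ≤ num) : Int :=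
  let count' := countf num count
  if count' ≥ z then num else loopA z (num + 1) count' (pv_one_le_succ num h)
termination_by 5 * (z - count).toNat + (4 - (num - 1) % 5).toNat
decreasing_by
  rename_i hn
  exact pv_dec_loopA z num count h hn

def find_min_num (z : Int) : Int := loopA z 1 0 (le_refl 1)

-- ===== PORT B =====
theorem pv_one_le_mul5 (p : Int) (hp : 1 ≤ p) : 1 ≤ p * 5 := by omega

theorem pv_dec_zaux (n p : Int) (hp : 1 ≤ p) (h : p ≤ n) :
    (n + 1 - p * 5).toNat < (n + 1 - p).toNat := by omega

-- `while p <= n: c += n // p; p *= 5` of zeros(n); carries 1 ≤ p for termination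
def zaux (n c p : Int) (hp : 1 ≤ p) : Int :=
  if h : p ≤ n then zaux n (c + PySem.Int.floordiv n p) (p * 5) (pv_one_le_mul5 p hp) else c
termination_by (n + 1 - p).toNat
decreasing_by exact pv_dec_zaux n p hp h

theorem pv_one_le_five : (1 : Int) ≤ 5 := by decide

-- zeros(n): trailing zeros of n! by Legendre's formula
def zerosB (n : Int) : Int := zaux n 0 5 pv_one_le_five

theorem pv_dec_bs_left (lo hi : Int) (h : lo < hi) :
    (PySem.Int.floordiv (lo + hi) 2 - lo).toNat < (hi - lo).toNat := by
  have hu : PySem.Int.floordiv (lo + hi) 2 < hi := by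
    rw [PySem.Int.floordiv_lt_iff_lt_mul (by decide)]; omega
  have hb := PySem.Int.floordiv_two_mid_bounds (lo := lo) (hi := hi) (by omega)
  omega

theorem pv_dec_bs_right (lo hi : Int) (h : lo < hi) :
    (hi - (PySem.Int.floordiv (lo + hi) 2 + 1)).toNat < (hi - lo).toNat := by
  have hb := PySem.Int.floordiv_two_mid_bounds (lo := lo) (hi := hi) (by omega)
  omega

-- `while lo < hi: …` binary search
def bs (z lo hi : Int) : Int :=
  if h : lo < hi then
    let mid := PySem.Int.floordiv (lo + hi) 2
    if zerosB mid ≥ z then bs z lo mid else bs z (mid + 1) hi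
  else lo
termination_by (hi - lo).toNat
decreasing_by
  · exact pv_dec_bs_left lo hi h
  · exact pv_dec_bs_right lo hi h

def find_min_num_alt (z : Int) : Int :=
  if z ≤ 0 then 1 else bs z 1 (5 * z)

-- ===== PRECONDITION & SPEC =====
def Spec_find_min_num (z : Int) (out : Int) : Prop := out = find_min_num_alt z
instance (z : Int) (out : Int) : Decidable (Spec_find_min_num z out) := by unfold Spec_find_min_num; infer_instance

-- ===== CLAIM (what is proved, stated in full; the proofs are below) =====
def Claim_equal_find_min_num : Prop := ∀ (z : Int), Dom_find_min_num z → Spec_find_min_num z (find_min_num z)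

-- ===== LEMMAS AND PROOFS =====

theorem countf_unfold (temp count : Int) :
    countf temp count = if PySem.Int.mod temp 5 = 0 ∧ temp ≠ 0 then
      countf (PySem.Int.floordiv temp 5) (count + 1) else count := by
  conv_lhs => rw [countf]
  split <;> rfl

theorem zaux_unfold (n c p : Int) (hp : 1 ≤ p) :
    zaux n c p hp = if p ≤ n then
      zaux n (c + PySem.Int.floordiv n p) (p * 5) (pv_one_le_mul5 p hp) else c := by
  conv_lhs => rw [zaux]
  split <;> rfl

-- accumulator lemmas
theorem countf_acc (temp c : Int) : countf temp c = c + countf temp 0 := by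
  rw [countf_unfold temp c, countf_unfold temp 0]
  split
  · rw [countf_acc _ (c + 1), countf_acc _ (0 + 1)]; ring
  · simp
termination_by temp.natAbs
decreasing_by
  all_goals
    rename_i h
    exact pv_dec_countf temp h.1 h.2

theorem zaux_acc (n c p : Int) (hp : 1 ≤ p) : zaux n c p hp = c + zaux n 0 p hp := by
  rw [zaux_unfold n c p hp, zaux_unfold n 0 p hp]
  split
  · rw [zaux_acc n (c + _) _ (by omega), zaux_acc n (0 + _) _ (by omega)]; ring
  · simp
termination_by (n + 1 - p).toNat
decreasing_by all_goals omega

theorem zaux_nonneg (n p : Int) (hp : 1 ≤ p) : 0 ≤ zaux n 0 p hp := by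
  rw [zaux_unfold]
  split
  · rename_i hle
    rw [zaux_acc _ _ _ (by omega)]
    have h1 : 0 ≤ PySem.Int.floordiv n p := by
      rw [PySem.Int.floordiv_eq_ediv_of_pos (by omega)]
      exact Int.ediv_nonneg (by omega) (by omega)
    have h2 := zaux_nonneg n (p * 5) (by omega)
    omega
  · exact le_refl _
termination_by (n + 1 - p).toNat
decreasing_by omega

theorem zaux_mono (n m p : Int) (hp : 1 ≤ p) (hnm : n ≤ m) :
    zaux n 0 p hp ≤ zaux m 0 p hp := by
  rw [zaux_unfold n 0 p hp, zaux_unfold m 0 p hp]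
  by_cases h1 : p ≤ n
  · simp only [h1, if_true, show p ≤ m by omega, if_true]
    rw [zaux_acc _ _ _ (by omega), zaux_acc m _ _ (by omega)]
    have hd : PySem.Int.floordiv n p ≤ PySem.Int.floordiv m p := by
      rw [PySem.Int.floordiv_eq_ediv_of_pos (by omega),
          PySem.Int.floordiv_eq_ediv_of_pos (by omega)]
      exact Int.ediv_le_ediv (by omega) hnm
    have hz := zaux_mono n m (p * 5) (by omega) hnm
    omega
  · simp only [h1, if_false]
    split
    · rw [zaux_acc _ _ _ (by omega)]
      have h2 : 0 ≤ PySem.Int.floordiv m p := by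
        rw [PySem.Int.floordiv_eq_ediv_of_pos (by omega)]
        exact Int.ediv_nonneg (by omega) (by omega)
      have h3 := zaux_nonneg m (p * 5) (by omega)
      omega
    · exact le_refl _
termination_by (m + 1 - p).toNat
decreasing_by omega

-- chain-divisibility count: gchain p n = #{q ∈ {p, 5p, 25p, …} : q ∣ n} (for 1 ≤ p ≤ n)
def gchain (p n : Int) : Int :=
  if 1 ≤ p ∧ p ∣ n ∧ p ≤ n then 1 + gchain (p * 5) n else 0
termination_by (n + 1 - p).toNat
decreasing_by omega

theorem gchain_of_dvd (p n : Int) (hp : 1 ≤ p) (hn : 1 ≤ n) (h : p ∣ n) :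
    gchain p n = 1 + gchain (p * 5) n := by
  rw [gchain, if_pos ⟨hp, h, Int.le_of_dvd (by omega) h⟩]

theorem gchain_of_not_dvd (p n : Int) (h : ¬ p ∣ n) : gchain p n = 0 := by
  rw [gchain, if_neg (fun hc => h hc.2.1)]

theorem gchain_shift (p m : Int) (hp : 1 ≤ p) (hm : 1 ≤ m) :
    gchain (p * 5) (p * m) = gchain 5 m := by
  have hpm : 1 ≤ p * m := by nlinarith
  have hdvd : (p * 5 ∣ p * m) ↔ ((5:Int) ∣ m) := mul_dvd_mul_iff_left (by omega : p ≠ 0)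
  by_cases h5 : (5:Int) ∣ m
  · obtain ⟨m', hm'⟩ := h5
    have hm'1 : 1 ≤ m' := by omega
    rw [gchain_of_dvd _ _ (by omega) hpm (hdvd.mpr ⟨m', hm'⟩),
        gchain_of_dvd 5 m (by norm_num) hm ⟨m', hm'⟩]
    have e1 : p * m = (p * 5) * m' := by rw [hm']; ring
    have e2 : m = 5 * m' := hm'
    rw [e1, gchain_shift (p * 5) m' (by omega) hm'1]
    conv_rhs => rw [e2, gchain_shift 5 m' (by norm_num) hm'1]
  · rw [gchain_of_not_dvd _ _ (fun hc => h5 (hdvd.mp hc)),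
        gchain_of_not_dvd 5 m h5]
termination_by m.toNat
decreasing_by all_goals omega

theorem countf_eq_gchain (n : Int) (hn : 1 ≤ n) : countf n 0 = gchain 5 n := by
  have hmod : PySem.Int.mod n 5 = 0 ↔ (5:Int) ∣ n := PySem.Int.mod_eq_zero_iff_dvd n 5
  by_cases h5 : (5:Int) ∣ n
  · obtain ⟨k, hk⟩ := h5
    have hk1 : 1 ≤ k := by omega
    have hdv : PySem.Int.floordiv n 5 = k := by
      rw [PySem.Int.floordiv_eq_ediv_of_pos (by norm_num), hk,
          Int.mul_ediv_cancel_left _ (by norm_num)]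
    rw [countf_unfold, if_pos ⟨hmod.mpr ⟨k, hk⟩, by omega⟩, hdv,
        countf_acc, countf_eq_gchain k hk1,
        gchain_of_dvd 5 n (by norm_num) hn ⟨k, hk⟩]
    have e2 : gchain (5 * 5) n = gchain 5 k := by
      conv_lhs => rw [hk, gchain_shift 5 k (by norm_num) hk1]
    rw [e2]; ring
  · rw [countf_of_not_dvd _ _ (fun h => h5 (hmod.mp h)),
        gchain_of_not_dvd 5 n h5]
termination_by n.toNat
decreasing_by omega

-- floor-division difference: (n/p) - ((n-1)/p) = [p ∣ n]
theorem ediv_sub_ediv_pred (n p : Int) (hp : 1 ≤ p) :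
    n / p - (n - 1) / p = if p ∣ n then 1 else 0 := by
  by_cases h : p ∣ n
  · obtain ⟨k, hk⟩ := h
    subst hk
    rw [Int.mul_ediv_cancel_left _ (by omega)]
    have : (p * k - 1) / p = k - 1 := by
      rw [show p * k - 1 = (p - 1) + (k - 1) * p by ring,
          Int.add_mul_ediv_right _ _ (by omega : p ≠ 0),
          Int.ediv_eq_zero_of_lt (by omega) (by omega)]
      ring
    rw [this]
    have hdk : p ∣ p * k := ⟨k, rfl⟩
    simp [hdk]
  · have hne : n % p ≠ 0 := fun hc => h (Int.dvd_of_emod_eq_zero hc)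
    have h0 := Int.emod_nonneg n (by omega : p ≠ 0)
    have h1 := Int.emod_lt_of_pos n (by omega : (0:Int) < p)
    have he := Int.mul_ediv_add_emod n p
    have e1 : n - 1 = (n % p - 1) + p * (n / p) := by omega
    have h3 : (n - 1) / p = n / p := by
      rw [e1, Int.add_mul_ediv_left _ _ (by omega : p ≠ 0),
          Int.ediv_eq_zero_of_lt (by omega) (by omega)]
      ring
    simp [h, h3]

-- the difference of Legendre sums at n and n-1 is the chain count
theorem zaux_sub (p n : Int) (hp : 1 ≤ p) (hn : 1 ≤ n) :
    zaux n 0 p hp - zaux (n - 1) 0 p hp = gchain p n := by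
  rw [zaux_unfold n 0 p hp, zaux_unfold (n - 1) 0 p hp]
  by_cases h1 : p ≤ n
  · by_cases h2 : p ≤ n - 1
    · simp only [h1, h2, if_true]
      rw [zaux_acc _ _ _ (by omega), zaux_acc (n - 1) _ _ (by omega)]
      have hd : PySem.Int.floordiv n p - PySem.Int.floordiv (n - 1) p
          = if p ∣ n then 1 else 0 := by
        rw [PySem.Int.floordiv_eq_ediv_of_pos (by omega),
            PySem.Int.floordiv_eq_ediv_of_pos (by omega)]
        exact ediv_sub_ediv_pred n p hp
      have hrec := zaux_sub (p * 5) n (by omega) hn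
      by_cases hdvd : p ∣ n
      · rw [gchain_of_dvd p n hp hn hdvd]
        simp only [hdvd, if_true] at hd
        omega
      · have hnd5 : ¬ (p * 5 ∣ n) := fun hc => hdvd (dvd_trans ⟨5, rfl⟩ hc)
        rw [gchain_of_not_dvd _ _ hnd5] at hrec
        rw [gchain_of_not_dvd _ _ hdvd]
        simp only [hdvd, if_false] at hd
        omega
    · -- here p = n
      have hpn : p = n := by omega
      simp only [h1, h2, if_true, if_false]
      rw [zaux_acc _ _ _ (by omega)]
      have hfd : PySem.Int.floordiv n p = 1 := by
        rw [PySem.Int.floordiv_eq_ediv_of_pos (by omega), hpn,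
            Int.ediv_self (by omega)]
      have hz5 : zaux n 0 (p * 5) (by omega) = 0 := by
        rw [zaux_unfold, if_neg (by omega)]
      have hdvd : p ∣ n := hpn ▸ dvd_refl p
      have hnd5 : ¬ (p * 5 ∣ n) := fun hc => by
        have := Int.le_of_dvd (by omega) hc; omega
      rw [gchain_of_dvd p n hp hn hdvd, gchain_of_not_dvd _ _ hnd5]
      omega
  · simp only [h1, if_false, show ¬ (p ≤ n - 1) by omega, if_false]
    have hnd : ¬ (p ∣ n) := fun hc => by
      have := Int.le_of_dvd (by omega) hc; omega
    rw [gchain_of_not_dvd _ _ hnd]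
    ring
termination_by (n + 1 - p).toNat
decreasing_by all_goals omega

-- telescoping step: zeros n = zeros (n-1) + v5(n)
theorem zerosB_step (n : Int) (hn : 1 ≤ n) :
    zerosB n = zerosB (n - 1) + countf n 0 := by
  have h := zaux_sub 5 n (by norm_num) hn
  rw [countf_eq_gchain n hn]
  unfold zerosB
  omega

theorem zerosB_mono (n m : Int) (h : n ≤ m) : zerosB n ≤ zerosB m :=
  zaux_mono n m 5 (by norm_num) h

theorem zerosB_zero : zerosB 0 = 0 := by
  unfold zerosB; rw [zaux_unfold, if_neg (by norm_num)]

theorem zerosB_five_mul (z : Int) (hz : 1 ≤ z) : z ≤ zerosB (5 * z) := by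
  unfold zerosB
  rw [zaux_unfold, if_pos (by omega : (5:Int) ≤ 5 * z), zaux_acc _ _ _ (by norm_num)]
  have h1 : PySem.Int.floordiv (5 * z) 5 = z := by
    rw [PySem.Int.floordiv_eq_ediv_of_pos (by norm_num),
        Int.mul_ediv_cancel_left _ (by norm_num)]
  have h2 := zaux_nonneg (5 * z) (5 * 5) (by norm_num)
  omega

-- A's loop returns the least n ≥ num with zeros n ≥ z, given count = zeros (num-1)
theorem loopA_spec (z num count : Int) (h : 1 ≤ num) (hc : count = zerosB (num - 1))
    (hmin : ∀ m, 1 ≤ m → m < num → zerosB m < z) :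
    num ≤ loopA z num count h ∧ z ≤ zerosB (loopA z num count h) ∧
      ∀ m, 1 ≤ m → m < loopA z num count h → zerosB m < z := by
  rw [loopA]
  by_cases hge : countf num count ≥ z
  · simp only [hge, if_true]
    refine ⟨le_refl _, ?_, hmin⟩
    rw [zerosB_step num h, ← hc, ← countf_acc]
    exact hge
  · simp only [hge, if_false]
    have hc' : countf num count = zerosB (num + 1 - 1) := by
      rw [show num + 1 - 1 = num by ring, zerosB_step num h, ← hc, ← countf_acc]
    have hmin' : ∀ m, 1 ≤ m → m < num + 1 → zerosB m < z := by
      intro m hm1 hm2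
      rcases lt_or_eq_of_le (by omega : m ≤ num) with hlt | heq
      · exact hmin m hm1 hlt
      · subst heq
        rw [zerosB_step m h, ← hc, ← countf_acc]
        omega
    have := loopA_spec z (num + 1) (countf num count) (by omega) hc' hmin'
    exact ⟨by omega, this.2.1, this.2.2⟩
termination_by 5 * (z - count).toNat + (4 - (num - 1) % 5).toNat
decreasing_by
  exact pv_dec_loopA z num count h hge

-- B's binary search returns the least n with zeros n ≥ z, within [lo, hi]
theorem bs_spec (z lo hi : Int) (h1 : 1 ≤ lo) (h2 : lo ≤ hi) (hhi : z ≤ zerosB hi)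
    (hlo : ∀ m, 1 ≤ m → m < lo → zerosB m < z) :
    lo ≤ bs z lo hi ∧ bs z lo hi ≤ hi ∧ z ≤ zerosB (bs z lo hi) ∧
      ∀ m, 1 ≤ m → m < bs z lo hi → zerosB m < z := by
  rw [bs]
  by_cases hlt : lo < hi
  · rw [dif_pos hlt]
    have hb := PySem.Int.floordiv_two_mid_bounds (lo := lo) (hi := hi) (by omega)
    have hu : PySem.Int.floordiv (lo + hi) 2 < hi := by
      rw [PySem.Int.floordiv_lt_iff_lt_mul (by norm_num)]; omega
    by_cases hge : zerosB (PySem.Int.floordiv (lo + hi) 2) ≥ z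
    · simp only [hge, if_true]
      have := bs_spec z lo (PySem.Int.floordiv (lo + hi) 2) h1 (by omega) hge hlo
      exact ⟨this.1, by omega, this.2.2⟩
    · simp only [hge, if_false]
      have hlo' : ∀ m, 1 ≤ m → m < PySem.Int.floordiv (lo + hi) 2 + 1 → zerosB m < z := by
        intro m hm1 hm2
        have := zerosB_mono m (PySem.Int.floordiv (lo + hi) 2) (by omega)
        omega
      have := bs_spec z (PySem.Int.floordiv (lo + hi) 2 + 1) hi (by omega) (by omega) hhi hlo'
      exact ⟨by omega, this.2.1, this.2.2⟩
  · rw [dif_neg hlt]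
    have he : lo = hi := by omega
    exact ⟨le_refl _, by omega, he ▸ hhi, hlo⟩
termination_by (hi - lo).toNat
decreasing_by
  · exact pv_dec_bs_left lo hi hlt
  · exact pv_dec_bs_right lo hi hlt

-- ===== VERDICT (by name: the statement is the Claim_ definition above) =====
theorem find_min_num_spec : Claim_equal_find_min_num := by
  unfold Claim_equal_find_min_num
  intro z _
  unfold Spec_find_min_num find_min_num find_min_num_alt
  by_cases hz : z ≤ 0
  · simp only [hz, if_true]
    rw [loopA]
    have hc : countf 1 0 = 0 := countf_of_not_dvd 1 0 (by decide)
    simp [hc, hz]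
  · simp only [hz, if_false]
    have hz1 : 1 ≤ z := by omega
    have hA := loopA_spec z 1 0 (by norm_num)
      (by rw [show (1:Int) - 1 = 0 by norm_num, zerosB_zero])
      (by intro m hm1 hm2; omega)
    have hB := bs_spec z 1 (5 * z) (by norm_num) (by omega) (zerosB_five_mul z hz1)
      (by intro m hm1 hm2; omega)
    rcases lt_trichotomy (loopA z 1 0 (by norm_num)) (bs z 1 (5 * z)) with h | h | h
    · have := hB.2.2.2 (loopA z 1 0 (by norm_num)) (by omega) h
      omega
    · exact h
    · have := hA.2.2 (bs z 1 (5 * z)) (by omega) h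
      omega
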